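-- pv_equiv track=rewrite | github.com/srikii/810HW | HW07_srikanth.py | book_index
-- ===== SOURCE A (Python) =====
-- from collections import defaultdict
--
-- def book_index(words):  # book index using default dictionary
--     index = defaultdict(set)
--     result = list()
--     for word, page in words:
--         index[word].add(page)
--
--     for word in sorted(index.keys()):
--         result.append([word, sorted(index[word])])
--
--     return result
-- ===== SOURCE B (Python) =====
-- from itertools import groupby
--
-- def book_index(words):  # sort once, then one grouped linear scan
--     srt = sorted(words, key=lambda wp: wp[0])
--     result = []
--     for word, group in groupby(srt, key=lambda wp: wp[0]):
--         result.append([word, sorted(set(p for _, p in group))])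
--     return result
-- ===== Notes on version B (the rewrite author's own statement) =====
-- stated objective: idiomatic
-- what changed: Replaces the defaultdict(set) scatter-then-sort-keys index with a single sort of the pair list followed by one itertools.groupby pass that dedups and sorts each word's pages.
import Mathlib
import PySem

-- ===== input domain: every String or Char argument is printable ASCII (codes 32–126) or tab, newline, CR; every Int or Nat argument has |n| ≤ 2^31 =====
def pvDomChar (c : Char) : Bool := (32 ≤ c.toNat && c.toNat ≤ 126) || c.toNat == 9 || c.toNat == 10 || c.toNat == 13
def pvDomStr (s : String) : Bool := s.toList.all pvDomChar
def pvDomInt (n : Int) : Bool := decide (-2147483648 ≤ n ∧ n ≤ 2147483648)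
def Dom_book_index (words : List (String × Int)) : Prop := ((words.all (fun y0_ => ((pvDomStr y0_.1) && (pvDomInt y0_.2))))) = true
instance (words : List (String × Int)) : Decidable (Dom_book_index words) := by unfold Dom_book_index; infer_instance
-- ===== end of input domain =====

-- B replaces A's defaultdict(set) scatter followed by a sort of the keys with a single
-- sort of the pair list and one itertools.groupby pass (more idiomatic, same cost).

-- ===== PORT A =====
def book_index (words : List (String × Int)) : List (String × List Int) :=
  let index : PySem.Dict String (PySem.Set Int) :=
    words.foldl (fun d wp => d.modify wp.1 PySem.Set.empty (fun s => PySem.Set.add s wp.2))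
      PySem.Dict.empty
  (PySem.List.sorted index.keys (fun w => w) false).foldl
    (fun result w =>
      result ++ [(w, PySem.List.sorted (index.getD w PySem.Set.empty) (fun p => p) false)]) []

-- ===== PORT B =====
-- one groupby pass over the word-sorted pair list: each run of equal words becomes one entry
def groupRuns : List (String × Int) → List (String × List Int)
  | [] => []
  | (w, p) :: rest =>
      (w, PySem.List.sorted
            (PySem.Set.ofList (p :: (rest.takeWhile (fun q => q.1 == w)).map Prod.snd))
            (fun x => x) false)
        :: groupRuns (rest.dropWhile (fun q => q.1 == w))
termination_by l => l.length
decreasing_by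
  simpa using Nat.lt_succ_of_le (List.length_dropWhile_le _ rest)

def book_index_alt (words : List (String × Int)) : List (String × List Int) :=
  groupRuns (PySem.List.sorted words (fun wp => wp.1) false)

-- ===== PRECONDITION & SPEC =====
def Spec_book_index (words : List (String × Int)) (out : List (String × List Int)) : Prop := out = book_index_alt words
instance (words : List (String × Int)) (out : List (String × List Int)) : Decidable (Spec_book_index words out) := by unfold Spec_book_index; infer_instance

-- ===== CLAIM (what is proved, stated in full; the proofs are below) =====
def Claim_equal_book_index : Prop := ∀ (words : List (String × Int)), Dom_book_index words → Spec_book_index words (book_index words)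

-- ===== LEMMAS AND PROOFS =====

-- the pages recorded for word w, in input order
def pagesOf (l : List (String × Int)) (w : String) : List Int :=
  (l.filter (fun q => q.1 == w)).map Prod.snd

-- the common canonical form of both results
def canon (l : List (String × Int)) : List (String × List Int) :=
  (PySem.List.sorted (PySem.Set.ofList (l.map Prod.fst)) (fun x => x) false).map
    (fun w => (w, PySem.List.sorted (PySem.Set.ofList (pagesOf l w)) (fun x => x) false))

theorem sortedSet_congr {α : Type} [LinearOrder α] [BEq α] [LawfulBEq α]
    (xs ys : List α) (h : ∀ x, x ∈ xs ↔ x ∈ ys) :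
    PySem.List.sorted (PySem.Set.ofList xs) (fun x => x) false
      = PySem.List.sorted (PySem.Set.ofList ys) (fun x => x) false := by
  exact (PySem.List.sorted_id_eq_sorted_id_iff_perm _ _).mpr
    ((List.perm_ext_iff_of_nodup (PySem.Set.nodup_ofList xs) (PySem.Set.nodup_ofList ys)).mpr
      (by simp [PySem.Set.mem_ofList, h]))

theorem getD_index (l : List (String × Int)) (d : PySem.Dict String (PySem.Set Int)) (w : String) :
    (l.foldl (fun d wp => d.modify wp.1 PySem.Set.empty (fun s => PySem.Set.add s wp.2)) d).getD
        w PySem.Set.empty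
      = PySem.Set.update (d.getD w PySem.Set.empty) (pagesOf l w) := by
  induction l generalizing d with
  | nil => simp [pagesOf, PySem.Set.update]
  | cons hd tl ih =>
      simp only [List.foldl_cons]
      rw [ih]
      by_cases hw : hd.1 = w
      · simp [pagesOf, hw, PySem.Set.update]
      · simp [pagesOf, hw, PySem.Dict.getD_modify, Ne.symm hw]

theorem foldl_append_eq_map {α β : Type} (g : α → β) (l : List α) (acc : List β) :
    l.foldl (fun r x => r ++ [g x]) acc = acc ++ l.map g := by
  induction l generalizing acc with
  | nil => simp
  | cons hd tl ih => simp [ih]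

theorem book_index_eq_canon (words : List (String × Int)) :
    book_index words = canon words := by
  unfold book_index canon
  simp only [PySem.Dict.keys_foldl_modify_key words Prod.fst PySem.Set.empty
      (fun _ wp => fun s => PySem.Set.add s wp.2) PySem.Dict.empty,
    PySem.Dict.keys_empty, foldl_append_eq_map, List.nil_append]
  refine List.map_congr_left fun w _ => ?_
  rw [getD_index words PySem.Dict.empty w, PySem.Dict.getD_empty]
  rfl

theorem pairwise_dropWhile {l : List (String × Int)} {w : String}
    (h : l.Pairwise (fun a b => a.1 ≤ b.1)) :
    (l.dropWhile (fun q => q.1 == w)).Pairwise (fun a b => a.1 ≤ b.1) :=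
  h.sublist (List.dropWhile_sublist _)

theorem gt_of_mem_dropWhile {l : List (String × Int)} {w : String}
    (h : l.Pairwise (fun a b => a.1 ≤ b.1)) (hle : ∀ q ∈ l, w ≤ q.1) :
    ∀ q ∈ l.dropWhile (fun q => q.1 == w), w < q.1 := by
  intro q hq
  have hmem : q ∈ l := (List.dropWhile_sublist _).subset hq
  have hqle : w ≤ q.1 := hle q hmem
  rcases hd : l.dropWhile (fun q => q.1 == w) with _ | ⟨r, t⟩
  · simp [hd] at hq
  · have hr1 : (fun q : String × Int => q.1 == w) r = false := by
      have := List.head?_dropWhile_not (fun q : String × Int => q.1 == w) l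
      rw [hd] at this; exact this
    have hrne : r.1 ≠ w := by simpa using hr1
    have hrle : w ≤ r.1 := hle r ((List.dropWhile_sublist _).subset (by rw [hd]; simp))
    have hrlt : w < r.1 := lt_of_le_of_ne hrle (Ne.symm hrne)
    rw [hd] at hq
    rcases List.mem_cons.mp hq with rfl | hqt
    · exact hrlt
    · have hpair : (l.dropWhile (fun q => q.1 == w)).Pairwise (fun a b => a.1 ≤ b.1) :=
        pairwise_dropWhile h
      rw [hd] at hpair
      exact lt_of_lt_of_le hrlt ((List.pairwise_cons.mp hpair).1 q hqt)

theorem groupRuns_eq_canon (ss : List (String × Int)) :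
    ss.Pairwise (fun a b => a.1 ≤ b.1) → groupRuns ss = canon ss := by
  induction ss using groupRuns.induct with
  | case1 => intro _; simp [groupRuns, canon, pagesOf, PySem.List.sorted, PySem.Set.ofList]
  | case2 w p rest ih =>
      intro h
      have hle : ∀ q ∈ rest, w ≤ q.1 := by
        intro q hq; exact (List.pairwise_cons.mp h).1 q hq
      have htl : rest.Pairwise (fun a b => a.1 ≤ b.1) := (List.pairwise_cons.mp h).2
      have hgt : ∀ q ∈ rest.dropWhile (fun q => q.1 == w), w < q.1 :=
        gt_of_mem_dropWhile htl hle
      have hrun : ∀ q ∈ rest.takeWhile (fun q : String × Int => q.1 == w), q.1 = w := by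
        intro q hq; simpa using List.mem_takeWhile_imp hq
      have hsplit : rest.takeWhile (fun q : String × Int => q.1 == w)
          ++ rest.dropWhile (fun q : String × Int => q.1 == w) = rest :=
        List.takeWhile_append_dropWhile
      -- the pages of w in ss are exactly the head run
      have hfilter : pagesOf ((w, p) :: rest) w
          = p :: (rest.takeWhile (fun q : String × Int => q.1 == w)).map Prod.snd := by
        unfold pagesOf
        rw [← hsplit]
        rw [List.filter_cons, List.filter_append]
        have h1 : (rest.takeWhile (fun q : String × Int => q.1 == w)).filter
            (fun q => q.1 == w) = rest.takeWhile (fun q : String × Int => q.1 == w) :=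
          List.filter_eq_self.mpr (fun q hq => by simp [hrun q hq])
        have h2 : (rest.dropWhile (fun q : String × Int => q.1 == w)).filter
            (fun q => q.1 == w) = [] :=
          List.filter_eq_nil_iff.mpr (fun q hq => by simp [ne_of_gt (hgt q hq)])
        simp [h1, h2]
      -- the sorted distinct words of ss are w followed by those of the dropWhile tail
      have hspine : PySem.List.sorted (PySem.Set.ofList (((w, p) :: rest).map Prod.fst))
            (fun x => x) false
          = w :: PySem.List.sorted
              (PySem.Set.ofList ((rest.dropWhile (fun q => q.1 == w)).map Prod.fst))
              (fun x => x) false := by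
        apply PySem.List.sorted_eq_of_perm_of_pairwise_lt
        · have hnd1 : (w :: PySem.List.sorted
              (PySem.Set.ofList ((rest.dropWhile (fun q => q.1 == w)).map Prod.fst))
              (fun x => x) false).Nodup := by
            refine List.nodup_cons.mpr ⟨?_, ?_⟩
            · intro hmem
              rw [PySem.List.mem_sorted, PySem.Set.mem_ofList, List.mem_map] at hmem
              obtain ⟨q, hq, hq1⟩ := hmem
              exact absurd (hq1 ▸ hgt q hq) (lt_irrefl w)
            · exact ((PySem.List.sorted_perm _ _ _).nodup_iff).mpr (PySem.Set.nodup_ofList _)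
          refine (List.perm_ext_iff_of_nodup hnd1 (PySem.Set.nodup_ofList _)).mpr fun a => ?_
          simp only [List.mem_cons, PySem.List.mem_sorted, PySem.Set.mem_ofList, List.mem_map]
          constructor
          · rintro (h1 | ⟨q, hq, rfl⟩)
            · exact ⟨(w, p), Or.inl rfl, h1.symm⟩
            · exact ⟨q, by simp [(List.dropWhile_sublist _).subset hq]⟩
          · rintro ⟨q, hq, rfl⟩
            rcases hq with rfl | hqr
            · exact Or.inl rfl
            · rw [← hsplit] at hqr
              rcases List.mem_append.mp hqr with hqt | hqd
              · exact Or.inl (hrun q hqt)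
              · exact Or.inr ⟨q, hqd, rfl⟩
        · refine List.pairwise_cons.mpr ⟨?_, PySem.List.sorted_ofList_pairwise_lt _⟩
          intro y hy
          rw [PySem.List.mem_sorted, PySem.Set.mem_ofList, List.mem_map] at hy
          obtain ⟨q, hq, rfl⟩ := hy
          exact hgt q hq
      -- pages of any later word are untouched by the head run
      have hpages : ∀ w', w < w' →
          pagesOf ((w, p) :: rest) w' = pagesOf (rest.dropWhile (fun q => q.1 == w)) w' := by
        intro w' hw'
        unfold pagesOf
        rw [← hsplit, List.filter_cons, List.filter_append]
        have h1 : (rest.takeWhile (fun q : String × Int => q.1 == w)).filter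
            (fun q => q.1 == w') = [] :=
          List.filter_eq_nil_iff.mpr (fun q hq => by simp [hrun q hq, ne_of_lt hw'])
        simp [h1, ne_of_lt hw']
      rw [groupRuns]
      rw [ih (pairwise_dropWhile htl)]
      unfold canon
      rw [hspine, List.map_cons, hfilter]
      congr 1
      refine List.map_congr_left fun w' hw' => ?_
      have hw'gt : w < w' := by
        rw [PySem.List.mem_sorted, PySem.Set.mem_ofList, List.mem_map] at hw'
        obtain ⟨q, hq, rfl⟩ := hw'
        exact hgt q hq
      rw [hpages w' hw'gt]

theorem canon_sorted (words : List (String × Int)) :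
    canon (PySem.List.sorted words (fun wp => wp.1) false) = canon words := by
  have hperm : (PySem.List.sorted words (fun wp => wp.1) false).Perm words :=
    PySem.List.sorted_perm _ _ _
  unfold canon
  have hspine : PySem.List.sorted
        (PySem.Set.ofList ((PySem.List.sorted words (fun wp => wp.1) false).map Prod.fst))
        (fun x => x) false
      = PySem.List.sorted (PySem.Set.ofList (words.map Prod.fst)) (fun x => x) false :=
    sortedSet_congr _ _ (fun x => (hperm.map Prod.fst).mem_iff)
  rw [hspine]
  refine List.map_congr_left fun w _ => ?_
  congr 1
  exact sortedSet_congr _ _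
    (fun x => (((hperm.filter _).map Prod.snd)).mem_iff)

-- ===== VERDICT (by name: the statement is the Claim_ definition above) =====
theorem book_index_spec : Claim_equal_book_index := by
  intro words _
  unfold Spec_book_index book_index_alt
  rw [book_index_eq_canon,
    groupRuns_eq_canon _ (PySem.List.sorted_pairwise words (fun wp => wp.1)),
    canon_sorted]
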